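-- pv_equiv track=rewrite | github.com/ssarangi/algorithms | codeeval/hard/string_substitution.py | string_substitution
-- ===== SOURCE A (Python) =====
-- def is_in_range(replaced_idx, i):
--     for left, right in replaced_idx:
--         if left <= i <= right:
--             return True
--     return False
--
-- def string_substitution(S, find_replace):
--     replaced_idx = []
--
--     for find_str, replace_str in find_replace:
--         j = 0
--         while j < len(S):
--             if is_in_range(replaced_idx, j):
--                 j += 1
--                 continue
--
--             curr_str = S[j: j + len(find_str)]
--
--             if curr_str == find_str:
--                 S = S[0:j] + replace_str + S[j + len(find_str):]
--                 replaced_idx.append((j, j + len(find_str) - 1))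
--                 break
--
--             j += 1
--
--     return S
-- ===== SOURCE B (Python) =====
-- def string_substitution(S, find_replace):
--     # Rabin-Karp: slide an exact (no-modulus) rolling hash over S for each rule,
--     # and keep the set of already-replaced positions instead of interval scans.
--     BASE = 1 << 21
--     covered = set()
--     for f, rpl in find_replace:
--         L = len(f)
--         if L == 0:
--             j = next((p for p in range(len(S)) if p not in covered), None)
--         else:
--             j = None
--             if L <= len(S):
--                 hf = 0
--                 for c in f:
--                     hf = hf * BASE + ord(c)
--                 h = 0
--                 for c in S[:L]:
--                     h = h * BASE + ord(c)
--                 top = BASE ** (L - 1)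
--                 for p in range(len(S) - L + 1):
--                     if p not in covered and h == hf and S[p:p + L] == f:
--                         j = p
--                         break
--                     if p + L < len(S):
--                         h = (h - ord(S[p]) * top) * BASE + ord(S[p + L])
--         if j is not None:
--             S = S[:j] + rpl + S[j + L:]
--             covered.update(range(j, j + L))
--     return S
-- ===== Notes on version B (the rewrite author's own statement) =====
-- stated objective: alternative
-- what changed: B matches each pattern with a Rabin-Karp exact rolling hash (one hash update per position, slice comparison only on a hash hit) and keeps a set of covered positions, instead of A's per-position slice comparison plus a per-position scan of the recorded interval list.
import Mathlib
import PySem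

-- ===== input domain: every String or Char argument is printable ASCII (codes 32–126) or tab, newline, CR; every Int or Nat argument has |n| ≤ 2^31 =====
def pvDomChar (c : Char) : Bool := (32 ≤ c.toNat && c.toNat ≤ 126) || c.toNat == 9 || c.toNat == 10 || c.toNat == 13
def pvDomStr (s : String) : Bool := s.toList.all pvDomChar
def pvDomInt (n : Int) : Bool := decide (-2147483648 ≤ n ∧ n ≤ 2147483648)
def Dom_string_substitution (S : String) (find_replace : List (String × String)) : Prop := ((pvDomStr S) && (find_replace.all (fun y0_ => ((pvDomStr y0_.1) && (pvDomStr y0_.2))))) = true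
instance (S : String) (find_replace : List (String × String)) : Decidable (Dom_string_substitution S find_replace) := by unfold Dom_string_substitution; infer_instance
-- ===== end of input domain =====

-- B replaces A's per-position slice-compare scan (with a per-position interval-list test)
-- by Rabin–Karp: an exact rolling hash slid once per rule, plus a set of covered positions;
-- objective: alternative (a different matching algorithm of similar cost).

-- ===== PORT A =====
-- is_in_range: first-match loop over the recorded intervals
def isInRange : List (Int × Int) → Int → Bool
  | [], _ => false
  | (l, r) :: rest, i => if l ≤ i ∧ i ≤ r then true else isInRange rest i

-- the inner `while j < len(S)` loop of A for one (find,replace) rule; S[a:b] slices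
-- with 0 ≤ a are exactly take/drop here
def scanA (S f rpl : List Char) (idx : List (Int × Int)) (j : Nat) :
    List Char × List (Int × Int) :=
  if j < S.length then
    if isInRange idx (j : Int) then scanA S f rpl idx (j + 1)
    else if (S.drop j).take f.length = f then
      (S.take j ++ rpl ++ S.drop (j + f.length),
       idx ++ [((j : Int), (j : Int) + f.length - 1)])
    else scanA S f rpl idx (j + 1)
  else (S, idx)
termination_by S.length - j

-- the outer `for find_str, replace_str in find_replace` loop
def ruleLoopA : List (String × String) → List Char → List (Int × Int) → List Char
  | [], S, _ => S
  | (f, rpl) :: rest, S, idx =>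
      let p := scanA S f.toList rpl.toList idx 0
      ruleLoopA rest p.1 p.2

def string_substitution (S : String) (find_replace : List (String × String)) : String :=
  String.ofList (ruleLoopA find_replace S.toList [])

-- ===== PORT B =====
-- `h = h * BASE + ord(c)` (BASE = 1 << 21)
def hashStep (h : Int) (c : Char) : Int := h * 2097152 + (c.toNat : Int)

-- the two `for c in …: h = h * BASE + ord(c)` loops
def hashChars (cs : List Char) : Int := cs.foldl hashStep 0

-- `next((p for p in range(len(S)) if p not in covered), None)`  (the L == 0 branch)
def firstUncov (S : List Char) (cov : PySem.Set Int) (p : Nat) : Option Nat :=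
  if p < S.length then
    if cov.contains (p : Int) then firstUncov S cov (p + 1) else some p
  else none
termination_by S.length - p

-- `for p in range(len(S) - L + 1): …` with the rolling-hash update; indexing
-- S[p] / S[p+L] is ord on positions the guards keep in range (getD never defaults)
def rollB (S f : List Char) (cov : PySem.Set Int) (hf top : Int) (p : Nat) (h : Int) :
    Option Nat :=
  if p < S.length - f.length + 1 then
    if ¬ cov.contains (p : Int) = true ∧ h = hf ∧ (S.drop p).take f.length = f then
      some p
    else
      rollB S f cov hf top (p + 1)
        (if p + f.length < S.length then
          (h - ((S.getD p 'x').toNat : Int) * top) * 2097152 +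
            ((S.getD (p + f.length) 'x').toNat : Int)
        else h)
  else none
termination_by S.length - f.length + 1 - p

-- the outer rule loop of B with its covered-position set
def ruleLoopB : List (String × String) → List Char → PySem.Set Int → List Char
  | [], S, _ => S
  | (f, rpl) :: rest, S, cov =>
      let L := f.toList.length
      let j : Option Nat :=
        if L = 0 then firstUncov S cov 0
        else if L ≤ S.length then
          rollB S f.toList cov (hashChars f.toList) (2097152 ^ (L - 1)) 0
            (hashChars (S.take L))
        else none
      match j with
      | none => ruleLoopB rest S cov
      | some j =>
          ruleLoopB rest (S.take j ++ rpl.toList ++ S.drop (j + L))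
            (PySem.Set.update cov (PySem.List.pyRange (j : Int) ((j : Int) + L) 1))

def string_substitution_alt (S : String) (find_replace : List (String × String)) : String :=
  String.ofList (ruleLoopB find_replace S.toList [])

-- ===== PRECONDITION & SPEC =====
def Spec_string_substitution (S : String) (find_replace : List (String × String)) (out : String) : Prop := out = string_substitution_alt S find_replace
instance (S : String) (find_replace : List (String × String)) (out : String) : Decidable (Spec_string_substitution S find_replace out) := by unfold Spec_string_substitution; infer_instance

-- ===== CLAIM (what is proved, stated in full; the proofs are below) =====
def Claim_equal_string_substitution : Prop := ∀ (S : String) (find_replace : List (String × String)), Dom_string_substitution S find_replace → Spec_string_substitution S find_replace (string_substitution S find_replace)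

-- ===== LEMMAS AND PROOFS =====

-- the first q in [p, n) with P q, the search both inner loops perform
def ffind (P : Nat → Bool) (n p : Nat) : Option Nat :=
  if p < n then (if P p then some p else ffind P n (p + 1)) else none
termination_by n - p

theorem ffind_step (P : Nat → Bool) (n p : Nat) (h : p < n) :
    ffind P n p = if P p then some p else ffind P n (p + 1) := by
  rw [ffind, if_pos h]

theorem ffind_stop (P : Nat → Bool) (n p : Nat) (h : ¬ p < n) :
    ffind P n p = none := by
  rw [ffind, if_neg h]

theorem ffind_congr (P Q : Nat → Bool) (n : Nat) :
    ∀ p, (∀ q, p ≤ q → q < n → P q = Q q) → ffind P n p = ffind Q n p := by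
  suffices h : ∀ k p, n - p ≤ k → (∀ q, p ≤ q → q < n → P q = Q q) →
      ffind P n p = ffind Q n p from fun p hp => h n p (by omega) hp
  intro k
  induction k with
  | zero =>
    intro p hk _
    rw [ffind_stop P n p (by omega), ffind_stop Q n p (by omega)]
  | succ k ih =>
    intro p hk hpq
    by_cases hp : p < n
    · rw [ffind_step P n p hp, ffind_step Q n p hp, hpq p le_rfl hp,
        ih (p + 1) (by omega) (fun q hq hq' => hpq q (by omega) hq')]
    · rw [ffind_stop P n p hp, ffind_stop Q n p hp]

theorem ffind_shrink (P : Nat → Bool) (n m : Nat) (hnm : n ≤ m)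
    (hfalse : ∀ q, n ≤ q → q < m → P q = false) :
    ∀ p, ffind P m p = ffind P n p := by
  suffices h : ∀ k p, m - p ≤ k → ffind P m p = ffind P n p from fun p => h m p (by omega)
  intro k
  induction k with
  | zero =>
    intro p hk
    rw [ffind_stop P m p (by omega), ffind_stop P n p (by omega)]
  | succ k ih =>
    intro p hk
    by_cases hpn : p < n
    · rw [ffind_step P m p (by omega), ffind_step P n p hpn]
      by_cases hP : P p = true
      · rw [if_pos hP, if_pos hP]
      · rw [if_neg hP, if_neg hP, ih (p + 1) (by omega)]
    · by_cases hpm : p < m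
      · rw [ffind_step P m p hpm, if_neg (by simp [hfalse p (by omega) hpm]),
          ih (p + 1) (by omega), ffind_stop P n p hpn, ffind_stop P n (p + 1) (by omega)]
      · rw [ffind_stop P m p hpm, ffind_stop P n p hpn]

-- A's inner scan is exactly an ffind over [j, len S)
theorem scanA_eq_ffind (S f rpl : List Char) (idx : List (Int × Int)) :
    ∀ j, scanA S f rpl idx j =
      match ffind (fun q => !isInRange idx (q : Int) &&
          decide ((S.drop q).take f.length = f)) S.length j with
      | none => (S, idx)
      | some q => (S.take q ++ rpl ++ S.drop (q + f.length),
          idx ++ [((q : Int), (q : Int) + f.length - 1)]) := by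
  suffices h : ∀ k j, S.length - j ≤ k → scanA S f rpl idx j =
      match ffind (fun q => !isInRange idx (q : Int) &&
          decide ((S.drop q).take f.length = f)) S.length j with
      | none => (S, idx)
      | some q => (S.take q ++ rpl ++ S.drop (q + f.length),
          idx ++ [((q : Int), (q : Int) + f.length - 1)]) from
    fun j => h S.length j (by omega)
  intro k
  induction k with
  | zero =>
    intro j hk
    rw [scanA, if_neg (by omega : ¬ j < S.length),
      ffind_stop _ S.length j (by omega)]
  | succ k ih =>
    intro j hk
    by_cases hj : j < S.length
    · rw [scanA, if_pos hj, ffind_step _ S.length j hj]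
      by_cases hc : isInRange idx (j : Int) = true
      · rw [if_pos hc, if_neg (by simp [hc]), ih (j + 1) (by omega)]
      · by_cases hm : (S.drop j).take f.length = f
        · rw [if_neg hc, if_pos hm, if_pos (by simp [eq_false_of_ne_true hc, hm])]
        · rw [if_neg hc, if_neg hm, if_neg (by simp [hm]), ih (j + 1) (by omega)]
    · rw [scanA, if_neg hj, ffind_stop _ S.length j hj]

theorem firstUncov_eq_ffind (S : List Char) (cov : PySem.Set Int) :
    ∀ p, firstUncov S cov p = ffind (fun q => !cov.contains (q : Int)) S.length p := by
  suffices h : ∀ k p, S.length - p ≤ k →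
      firstUncov S cov p = ffind (fun q => !cov.contains (q : Int)) S.length p from
    fun p => h S.length p (by omega)
  intro k
  induction k with
  | zero =>
    intro p hk
    rw [firstUncov, if_neg (by omega : ¬ p < S.length),
      ffind_stop _ S.length p (by omega)]
  | succ k ih =>
    intro p hk
    by_cases hp : p < S.length
    · rw [firstUncov, if_pos hp, ffind_step _ S.length p hp]
      by_cases hc : cov.contains (p : Int) = true
      · rw [if_pos hc, if_neg (by simpa using hc), ih (p + 1) (by omega)]
      · rw [if_neg hc, if_pos (by simpa using hc)]
    · rw [firstUncov, if_neg hp, ffind_stop _ S.length p hp]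

-- `foldl hashStep` with a nonzero accumulator, in closed form
theorem hashChars_init (l : List Char) : ∀ a : Int,
    l.foldl hashStep a = a * 2097152 ^ l.length + hashChars l := by
  induction l with
  | nil => intro a; simp [hashChars]
  | cons c t ih =>
    intro a
    simp only [List.foldl_cons, List.length_cons, hashChars] at *
    rw [ih (hashStep a c), ih (hashStep 0 c)]
    simp only [hashStep]
    ring

-- one rolling-hash step: the update recomputes the hash of the next window
theorem hash_roll (S : List Char) (L p : Nat) (hL : 1 ≤ L) (hwin : p + L < S.length) :
    (hashChars ((S.drop p).take L) - ((S.getD p 'x').toNat : Int) * 2097152 ^ (L - 1)) *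
        2097152 + ((S.getD (p + L) 'x').toNat : Int) =
      hashChars ((S.drop (p + 1)).take L) := by
  have hp : p < S.length := by omega
  have h2 : (S.drop p).take L = S[p] :: (S.drop (p + 1)).take (L - 1) := by
    obtain ⟨L', rfl⟩ : ∃ L', L = L' + 1 := ⟨L - 1, by omega⟩
    rw [List.drop_eq_getElem_cons hp, List.take_succ_cons]
    simp
  have hlen : ((S.drop (p + 1)).take (L - 1)).length = L - 1 := by
    rw [List.length_take, List.length_drop]; omega
  have h3 : (S.drop (p + 1)).take L = (S.drop (p + 1)).take (L - 1) ++ [S[p + L]] := by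
    conv_lhs => rw [show L = (L - 1) + 1 by omega, List.take_add_one]
    rw [List.getElem?_drop, show p + 1 + (L - 1) = p + L by omega,
      List.getElem?_eq_getElem hwin]
    rfl
  rw [h2, h3, List.getD_eq_getElem S 'x' hp, List.getD_eq_getElem S 'x' hwin]
  simp only [hashChars, List.foldl_cons, List.foldl_append, List.foldl_nil]
  rw [hashChars_init ((S.drop (p + 1)).take (L - 1)) (hashStep 0 S[p]), hlen]
  simp only [hashChars, hashStep]
  ring

-- B's rolling loop is the same ffind over [p, len S − L + 1)
theorem rollB_eq_ffind (S f : List Char) (cov : PySem.Set Int)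
    (hL : 1 ≤ f.length) (hlen : f.length ≤ S.length) :
    ∀ p h, p ≤ S.length - f.length → h = hashChars ((S.drop p).take f.length) →
      rollB S f cov (hashChars f) (2097152 ^ (f.length - 1)) p h =
        ffind (fun q => !cov.contains (q : Int) &&
          decide ((S.drop q).take f.length = f)) (S.length - f.length + 1) p := by
  suffices hsuf : ∀ k p h, S.length - f.length + 1 - p ≤ k → p ≤ S.length - f.length →
      h = hashChars ((S.drop p).take f.length) →
      rollB S f cov (hashChars f) (2097152 ^ (f.length - 1)) p h =
        ffind (fun q => !cov.contains (q : Int) &&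
          decide ((S.drop q).take f.length = f)) (S.length - f.length + 1) p from
    fun p h hp hh => hsuf (S.length - f.length + 1) p h (by omega) hp hh
  intro k
  induction k with
  | zero =>
    intro p h hk hp hh
    omega
  | succ k ih =>
    intro p h hk hp hh
    have hpn : p < S.length - f.length + 1 := by omega
    rw [rollB, if_pos hpn, ffind_step _ _ p hpn]
    by_cases hc : cov.contains (p : Int) = true
    · have hcmem : (p : Int) ∈ cov := by simpa using hc
      have hcond : (!cov.contains (p : Int) &&
          decide ((S.drop p).take f.length = f)) = false := by simp [hcmem]
      rw [if_neg (fun hcontra => hcontra.1 hc), hcond,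
        if_neg (fun hcontra => Bool.false_ne_true hcontra)]
      by_cases hroll : p + f.length < S.length
      · rw [if_pos hroll]
        exact ih (p + 1) _ (by omega) (by omega)
          (by rw [hh, hash_roll S f.length p hL hroll])
      · rw [if_neg hroll]
        rw [rollB, if_neg (by omega : ¬ p + 1 < S.length - f.length + 1),
          ffind_stop _ _ (p + 1) (by omega)]
    · have hc' : (p : Int) ∉ cov := by simpa using hc
      by_cases hm : (S.drop p).take f.length = f
      · have hcond : (!cov.contains (p : Int) &&
            decide ((S.drop p).take f.length = f)) = true := by simp [hc', hm]
        rw [if_pos ⟨hc, by rw [hh, hm], hm⟩, hcond, if_pos rfl]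
      · have hcond : (!cov.contains (p : Int) &&
            decide ((S.drop p).take f.length = f)) = false := by simp [hm]
        rw [if_neg (fun hcontra => hm hcontra.2.2), hcond,
          if_neg (fun hcontra => Bool.false_ne_true hcontra)]
        by_cases hroll : p + f.length < S.length
        · rw [if_pos hroll]
          exact ih (p + 1) _ (by omega) (by omega)
            (by rw [hh, hash_roll S f.length p hL hroll])
        · rw [if_neg hroll]
          rw [rollB, if_neg (by omega : ¬ p + 1 < S.length - f.length + 1),
            ffind_stop _ _ (p + 1) (by omega)]

-- appending one interval to A's list adds exactly that closed range to the test
theorem isInRange_append (xs : List (Int × Int)) (l r i : Int) :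
    isInRange (xs ++ [(l, r)]) i = (isInRange xs i || decide (l ≤ i ∧ i ≤ r)) := by
  induction xs with
  | nil => simp [isInRange]
  | cons hd tl ih =>
    obtain ⟨a, b⟩ := hd
    by_cases h : a ≤ i ∧ i ≤ b <;> simp [isInRange, h, ih]

-- the rule loops agree whenever the covered set and the interval list cover the same positions
theorem ruleLoop_eq (fr : List (String × String)) :
    ∀ S cov idx, (∀ i : Int, PySem.Set.contains cov i = isInRange idx i) →
      ruleLoopB fr S cov = ruleLoopA fr S idx := by
  induction fr with
  | nil => intro S cov idx _; rfl
  | cons hd rest ih =>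
    intro S cov idx hinv
    obtain ⟨f, rpl⟩ := hd
    simp only [ruleLoopA, ruleLoopB]
    rw [scanA_eq_ffind]
    have hjeq : (if f.toList.length = 0 then firstUncov S cov 0
        else if f.toList.length ≤ S.length then
          rollB S f.toList cov (hashChars f.toList) (2097152 ^ (f.toList.length - 1)) 0
            (hashChars (S.take f.toList.length))
        else none)
        = ffind (fun q => !isInRange idx (q : Int) &&
            decide ((S.drop q).take f.toList.length = f.toList)) S.length 0 := by
      by_cases h0 : f.toList.length = 0
      · have hf0 : f.toList = [] := List.length_eq_zero_iff.mp h0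
        rw [if_pos h0, firstUncov_eq_ffind]
        apply ffind_congr
        intro q _ _
        simp [hf0, ← hinv (q : Int)]
      · by_cases hle : f.toList.length ≤ S.length
        · rw [if_neg h0, if_pos hle,
            rollB_eq_ffind S f.toList cov (by omega) hle 0 _ (by omega) (by rw [List.drop_zero])]
          rw [ffind_shrink _ (S.length - f.toList.length + 1) S.length (by omega)
            (fun q hq hq' => by
              have hne : (S.drop q).take f.toList.length ≠ f.toList := by
                intro hcontra
                have := congrArg List.length hcontra
                rw [List.length_take, List.length_drop] at this
                omega
              rw [decide_eq_false hne, Bool.and_false]) 0]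
          apply ffind_congr
          intro q _ _
          rw [← hinv (q : Int)]
        · rw [if_neg h0, if_neg hle,
            ffind_shrink _ 0 S.length (by omega)
              (fun q hq hq' => by
                have hne : (S.drop q).take f.toList.length ≠ f.toList := by
                  intro hcontra
                  have := congrArg List.length hcontra
                  rw [List.length_take, List.length_drop] at this
                  omega
                rw [decide_eq_false hne, Bool.and_false]) 0,
            ffind_stop _ 0 0 (by omega)]
    rw [hjeq]
    cases hff : ffind (fun q => !isInRange idx (q : Int) &&
        decide ((S.drop q).take f.toList.length = f.toList)) S.length 0 with
    | none => exact ih S cov idx hinv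
    | some j =>
      apply ih
      intro i
      have lhs_iff : (PySem.Set.update cov
            (PySem.List.pyRange (j : Int) ((j : Int) + f.toList.length) 1)).contains i = true ↔
          (i ∈ cov ∨ i ∈ PySem.List.pyRange (j : Int) ((j : Int) + f.toList.length) 1) := by
        rw [PySem.Set.contains_iff, PySem.Set.mem_update]
      have rhs_iff : isInRange (idx ++ [((j : Int), (j : Int) + f.toList.length - 1)]) i = true ↔
          (isInRange idx i = true ∨ ((j : Int) ≤ i ∧ i ≤ (j : Int) + f.toList.length - 1)) := by
        rw [isInRange_append]
        simp
      have hcov_iff : i ∈ cov ↔ isInRange idx i = true := by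
        rw [← PySem.Set.contains_iff, hinv i]
      have hrng_iff : i ∈ PySem.List.pyRange (j : Int) ((j : Int) + f.toList.length) 1 ↔
          ((j : Int) ≤ i ∧ i ≤ (j : Int) + f.toList.length - 1) := by
        rw [PySem.List.mem_pyRange_one]
        omega
      rw [Bool.eq_iff_iff, lhs_iff, rhs_iff, hcov_iff, hrng_iff]

-- ===== VERDICT (by name: the statement is the Claim_ definition above) =====
theorem string_substitution_spec : Claim_equal_string_substitution := by
  intro S fr _
  unfold Spec_string_substitution string_substitution string_substitution_alt
  rw [ruleLoop_eq fr S.toList [] [] (fun i => rfl)]
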